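-- pv_equiv track=rewrite | github.com/alexandre-clement/stage | execution.py | cantor_n
-- ===== SOURCE A (Python) =====
-- def newton(n):
--     x = n
--     y = (x + 1) // 2
--     while y < x:
--         x = y
--         y = (x + n // x) // 2
--     return x
--
-- def cantor(value):
--     n = newton(2 * value)
--     if n * (n + 1) // 2 > value:
--         n -= 1
--     p = n * (n + 1) // 2
--     x = value - p
--     return x, n - x
--
-- def cantor_n(value, n):
--     if n == 1:
--         return value,
--     if n == 2:
--         return cantor(value)
--     mid = n // 2
--     i, j = cantor(value)
--     return cantor_n(i, mid) + cantor_n(j, n - mid)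
-- ===== SOURCE B (Python) =====
-- def newton(n):
--     x = n
--     y = (x + 1) // 2
--     while y < x:
--         x = y
--         y = (x + n // x) // 2
--     return x
--
-- def cantor(value):
--     n = newton(2 * value)
--     if n * (n + 1) // 2 > value:
--         n -= 1
--     p = n * (n + 1) // 2
--     x = value - p
--     return x, n - x
--
-- def cantor_n(value, n):
--     # Iterative unpairing with an explicit LIFO stack instead of recursion.
--     stack = [(value, n)]
--     result = []
--     while stack:
--         v, k = stack.pop()
--         if k == 1:
--             result.append(v)
--         else:
--             mid = k // 2
--             i, j = cantor(v)
--             stack.append((j, k - mid))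
--             stack.append((i, mid))
--     return tuple(result)
-- ===== Notes on version B (the rewrite author's own statement) =====
-- stated objective: alternative
-- what changed: Replaced A's binary recursion (with an n==2 special case) by an iterative loop over an explicit LIFO stack of (value,width) jobs that collapses the n==2 case into the general split.
import Mathlib
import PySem

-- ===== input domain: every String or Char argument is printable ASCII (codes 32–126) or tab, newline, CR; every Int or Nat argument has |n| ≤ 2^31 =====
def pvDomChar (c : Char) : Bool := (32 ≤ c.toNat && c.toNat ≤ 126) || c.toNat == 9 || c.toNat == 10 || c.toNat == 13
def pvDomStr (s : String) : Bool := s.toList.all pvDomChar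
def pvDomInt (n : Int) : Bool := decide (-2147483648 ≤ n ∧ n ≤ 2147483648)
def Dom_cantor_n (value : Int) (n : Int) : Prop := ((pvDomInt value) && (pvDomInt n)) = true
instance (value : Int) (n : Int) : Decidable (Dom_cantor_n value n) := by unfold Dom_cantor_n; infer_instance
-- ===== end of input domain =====

-- B replaces A's binary recursion by an explicit LIFO stack loop (same values, same order).

-- ===== PORT A =====
-- while y < x: x = y; y = (x + n // x) // 2
-- '0 ≤ y' is a totality guard only: on every state this loop reaches in Python, y < x implies 0 ≤ y.
def newtonLoop (n x y : Int) : Int :=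
  if _h : 0 ≤ y ∧ y < x then
    newtonLoop n y (PySem.Int.floordiv (y + PySem.Int.floordiv n y) 2)
  else x
termination_by x.toNat
decreasing_by omega

def newton (n : Int) : Int :=
  newtonLoop n n (PySem.Int.floordiv (n + 1) 2)

def cantor (value : Int) : Int × Int :=
  let n0 := newton (2 * value)
  let n := if PySem.Int.floordiv (n0 * (n0 + 1)) 2 > value then n0 - 1 else n0
  let p := PySem.Int.floordiv (n * (n + 1)) 2
  let x := value - p
  (x, n - x)

-- the '3 ≤ n' test is a totality guard only: for n ≤ 0 Python recurses forever (RecursionError), outside Pre_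
def cantor_n (value : Int) (n : Int) : List Int :=
  if n = 1 then [value]
  else if n = 2 then [(cantor value).1, (cantor value).2]
  else if _h : 3 ≤ n then
    let mid := PySem.Int.floordiv n 2
    cantor_n (cantor value).1 mid ++ cantor_n (cantor value).2 (n - mid)
  else []
termination_by n.toNat
decreasing_by
  · have := PySem.Int.floordiv_eq_ediv_of_pos (a := n) (b := 2) (by omega)
    omega
  · have := PySem.Int.floordiv_eq_ediv_of_pos (a := n) (b := 2) (by omega)
    omega

-- ===== PORT B =====
-- the '2 ≤ k' test is a totality guard only: with some k ≤ 0 on the stack Python's loop never terminates, outside Pre_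
def cantorNStack (stack : List (Int × Int)) (result : List Int) : List Int :=
  match stack with
  | [] => result
  | (v, k) :: rest =>
    if k = 1 then cantorNStack rest (result ++ [v])
    else if _h : 2 ≤ k then
      let mid := PySem.Int.floordiv k 2
      cantorNStack (((cantor v).1, mid) :: ((cantor v).2, k - mid) :: rest) result
    else result
termination_by (stack.map (fun p => (2 * p.2 - 1).toNat)).sum
decreasing_by
  · simp only [List.map_cons, List.sum_cons]
    omega
  · simp only [List.map_cons, List.sum_cons]
    have := PySem.Int.floordiv_eq_ediv_of_pos (a := k) (b := 2) (by omega)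
    omega

def cantor_n_alt (value : Int) (n : Int) : List Int :=
  cantorNStack [(value, n)] []

-- ===== PRECONDITION & SPEC =====
-- Pre_ excludes n ≤ 0: there Python A raises RecursionError and Python B loops forever.
def Pre_cantor_n (value : Int) (n : Int) : Prop := 1 ≤ n
instance (value : Int) (n : Int) : Decidable (Pre_cantor_n value n) := by unfold Pre_cantor_n; infer_instance
def pvWitness_cantor_n : Int × Int := (5, 3)

def Spec_cantor_n (value : Int) (n : Int) (out : List Int) : Prop := out = cantor_n_alt value n
instance (value : Int) (n : Int) (out : List Int) : Decidable (Spec_cantor_n value n out) := by unfold Spec_cantor_n; infer_instance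

-- ===== CLAIM (what is proved, stated in full; the proofs are below) =====
def Claim_equal_cantor_n : Prop := ∀ (value : Int) (n : Int), Dom_cantor_n value n → Pre_cantor_n value n → Spec_cantor_n value n (cantor_n value n)

-- ===== LEMMAS AND PROOFS =====
lemma cantor_n_one (v : Int) : cantor_n v 1 = [v] := by
  rw [cantor_n]; simp

lemma cantor_n_split (v k : Int) (hk : 2 ≤ k) :
    cantor_n v k =
      cantor_n (cantor v).1 (PySem.Int.floordiv k 2) ++
      cantor_n (cantor v).2 (k - PySem.Int.floordiv k 2) := by
  rcases eq_or_lt_of_le hk with h2 | h3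
  · subst_vars
    have : PySem.Int.floordiv (2 : Int) 2 = 1 := by decide
    rw [cantor_n]
    simp [cantor_n_one]
  · rw [cantor_n]
    simp [show k ≠ 1 by omega, show k ≠ 2 by omega, show 3 ≤ k by omega]

lemma cantorNStack_eq (stack : List (Int × Int)) (res : List Int)
    (h : ∀ p ∈ stack, 1 ≤ p.2) :
    cantorNStack stack res = res ++ stack.flatMap (fun p => cantor_n p.1 p.2) := by
  induction stack, res using cantorNStack.induct with
  | case1 res => simp [cantorNStack]
  | case2 res v rest ih =>
    rw [cantorNStack]
    rw [ih (by intro p hp; exact h p (List.mem_cons_of_mem _ hp))]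
    simp [cantor_n_one, List.append_assoc]
  | case3 res v k rest hk1 hk2 mid ih =>
    have hmid := PySem.Int.floordiv_eq_ediv_of_pos (a := k) (b := 2) (by omega)
    have mids : (1 : Int) ≤ mid ∧ mid ≤ k - 1 := by
      simp only [mid, hmid]; omega
    rw [cantorNStack]
    simp only [hk1, if_false, dif_pos hk2]
    rw [ih (by
      intro p hp
      simp only [List.mem_cons] at hp
      rcases hp with h' | h' | h'
      · rw [h']; exact mids.1
      · rw [h']; show (1 : Int) ≤ k - mid; omega
      · exact h p (List.mem_cons_of_mem _ h'))]
    simp only [List.flatMap_cons]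
    rw [cantor_n_split v k hk2]
    simp only [mid, List.append_assoc]
  | case4 res v k rest hk1 hk2 =>
    have h1 : (1 : Int) ≤ k := h (v, k) List.mem_cons_self
    exact absurd h1 (by omega)

-- ===== VERDICT (by name: the statement is the Claim_ definition above) =====
theorem cantor_n_spec : Claim_equal_cantor_n := by
  intro value n _ hn
  unfold Spec_cantor_n cantor_n_alt
  rw [cantorNStack_eq [(value, n)] [] (by intro p hp; simp only [List.mem_singleton] at hp; subst hp; exact hn)]
  simp
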